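-- pv_equiv track=rewrite | github.com/MrHamdulay/csc3-capstone | examples/data/Assignment_7/mntdom001/push.py | len_3
-- ===== SOURCE A (Python) =====
-- from copy import deepcopy
--
-- def len_3(array):
--
--     al_list = deepcopy(array)
--     al_list2 = []
--
--     if al_list[0] == al_list[1]:
--         al_list2.append(al_list[0] + al_list[1])
--         al_list2.append(al_list[2])
--         for i in range(2):
--             al_list2.append(0)
--
--
--     else:
--         al_list2.append(al_list[0])
--
--         if al_list[1] == al_list[2]:
--             al_list2.append(al_list[1] + al_list[2])
--
--             for l in range(2):
--                 al_list2.append(0)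
--
--
--         else:
--             al_list2.append(al_list[1])
--             al_list2.append(al_list[2])
--             al_list2.append(0)
--
--     return al_list2
-- ===== SOURCE B (Python) =====
-- def len_3(array):
--     x = [array[0], array[1], array[2]]
--     out = []
--     i = 0
--     while i < 3:
--         if i + 1 < 3 and x[i] == x[i + 1]:
--             out.append(x[i] + x[i + 1])
--             i += 2
--         else:
--             out.append(x[i])
--             i += 1
--     while len(out) < 4:
--         out.append(0)
--     return out
-- ===== Notes on version B (the rewrite author's own statement) =====
-- stated objective: simpler
-- what changed: Replaces A's hard-coded three-way nested branch with a generic left-to-right adjacent-merge scan over the first three elements followed by zero-padding to length 4.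
-- outside the precondition, e.g. on len_3([0]): A raises IndexError, B raises IndexError; on len_3([]): A raises IndexError, B raises IndexError
import Mathlib
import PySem

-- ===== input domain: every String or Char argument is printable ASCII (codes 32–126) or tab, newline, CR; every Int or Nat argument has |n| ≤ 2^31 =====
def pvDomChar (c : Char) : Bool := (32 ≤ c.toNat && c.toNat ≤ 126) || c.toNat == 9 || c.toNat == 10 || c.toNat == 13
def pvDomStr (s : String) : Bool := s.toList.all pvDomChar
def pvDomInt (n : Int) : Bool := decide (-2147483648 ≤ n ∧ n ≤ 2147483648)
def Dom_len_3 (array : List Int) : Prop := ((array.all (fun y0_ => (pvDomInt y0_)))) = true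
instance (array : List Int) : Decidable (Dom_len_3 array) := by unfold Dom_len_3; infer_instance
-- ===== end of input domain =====

-- B replaces A's hard-coded three-way nested branch with a generic adjacent-merge scan plus zero-padding (simpler).


-- ===== PORT A =====
-- literal transliteration of A's nested branches; al_list[i] → pyGetD (in range under Pre_)
def len_3 (array : List Int) : List Int :=
  let al_list := array
  if PySem.List.pyGetD al_list 0 0 = PySem.List.pyGetD al_list 1 0 then
    [PySem.List.pyGetD al_list 0 0 + PySem.List.pyGetD al_list 1 0,
     PySem.List.pyGetD al_list 2 0, 0, 0]
  else if PySem.List.pyGetD al_list 1 0 = PySem.List.pyGetD al_list 2 0 then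
    [PySem.List.pyGetD al_list 0 0,
     PySem.List.pyGetD al_list 1 0 + PySem.List.pyGetD al_list 2 0, 0, 0]
  else
    [PySem.List.pyGetD al_list 0 0, PySem.List.pyGetD al_list 1 0,
     PySem.List.pyGetD al_list 2 0, 0]

-- ===== PORT B =====
-- the while-loop merge scan of Source B as structural recursion over the extracted triple
def len_3_mergeScan : List Int → List Int
  | a :: b :: rest => if a = b then (a + b) :: len_3_mergeScan rest
                      else a :: len_3_mergeScan (b :: rest)
  | [a] => [a]
  | [] => []

def len_3_alt (array : List Int) : List Int :=
  let x := [PySem.List.pyGetD array 0 0, PySem.List.pyGetD array 1 0,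
            PySem.List.pyGetD array 2 0]
  let out := len_3_mergeScan x
  out ++ List.replicate (4 - out.length) 0

-- ===== PRECONDITION & SPEC =====
-- A indexes the first three elements directly: it raises IndexError on shorter lists.
def Pre_len_3 (array : List Int) : Prop := 3 ≤ array.length
instance (array : List Int) : Decidable (Pre_len_3 array) := by unfold Pre_len_3; infer_instance
def pvWitness_len_3 : List Int := [1, 1, 2]
def Spec_len_3 (array : List Int) (out : List Int) : Prop := out = len_3_alt array
instance (array : List Int) (out : List Int) : Decidable (Spec_len_3 array out) := by unfold Spec_len_3; infer_instance

-- ===== CLAIM (what is proved, stated in full; the proofs are below) =====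
def Claim_equal_len_3 : Prop := ∀ (array : List Int), Dom_len_3 array → Pre_len_3 array → Spec_len_3 array (len_3 array)

-- ===== LEMMAS AND PROOFS =====

-- ===== VERDICT (by name: the statement is the Claim_ definition above) =====
theorem len_3_spec : Claim_equal_len_3 := by
  intro array _ hpre
  obtain ⟨a, b, c, rest, rfl⟩ : ∃ a b c rest, array = a :: b :: c :: rest := by
    match array, hpre with
    | a :: b :: c :: rest, _ => exact ⟨a, b, c, rest, rfl⟩
  unfold Spec_len_3
  simp only [len_3, len_3_alt]
  have h0 : PySem.List.pyGetD (a :: b :: c :: rest) 0 0 = a := by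
    rw [PySem.List.pyGetD_ofNat']; simp
  have h1 : PySem.List.pyGetD (a :: b :: c :: rest) 1 0 = b := by
    rw [PySem.List.pyGetD_ofNat']; simp
  have h2 : PySem.List.pyGetD (a :: b :: c :: rest) 2 0 = c := by
    rw [PySem.List.pyGetD_ofNat']; simp
  rw [h0, h1, h2]
  by_cases hab : a = b <;> by_cases hbc : b = c <;> by_cases hac : a = c <;>
    simp [len_3_mergeScan, hab, hbc, hac] <;> split_ifs <;> simp [List.replicate]
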